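-- pv_equiv track=rewrite | github.com/Andrewvvvw/AOIS4 | lab2/src/boolean_derivatives.py | _derivative_at
-- ===== SOURCE A (Python) =====
-- def _derivative_at(values: list[int], index: int, mask: int) -> int:
--     total = 0
--     submask = mask
--     while True:
--         total ^= values[index ^ submask]
--         if submask == 0:
--             break
--         submask = (submask - 1) & mask
--     return total
-- ===== SOURCE B (Python) =====
-- def _derivative_at(values: list[int], index: int, mask: int) -> int:
--     # Divide and conquer on the lowest set bit of mask:
--     # XOR over all submasks s of mask of values[index ^ s] splits into the
--     # submasks without the lowest bit and those with it.
--     if mask == 0: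
--         return values[index]
--     rest = mask & (mask - 1)
--     low = mask ^ rest
--     return _derivative_at(values, index, rest) ^ _derivative_at(values, index ^ low, rest)
-- ===== Notes on version B (the rewrite author's own statement) =====
-- stated objective: alternative
-- what changed: The iterative submask-decrement loop (submask = (submask-1) & mask) is replaced by a divide-and-conquer recursion on the lowest set bit of mask, XOR-combining the two half-problems.
import Mathlib
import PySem

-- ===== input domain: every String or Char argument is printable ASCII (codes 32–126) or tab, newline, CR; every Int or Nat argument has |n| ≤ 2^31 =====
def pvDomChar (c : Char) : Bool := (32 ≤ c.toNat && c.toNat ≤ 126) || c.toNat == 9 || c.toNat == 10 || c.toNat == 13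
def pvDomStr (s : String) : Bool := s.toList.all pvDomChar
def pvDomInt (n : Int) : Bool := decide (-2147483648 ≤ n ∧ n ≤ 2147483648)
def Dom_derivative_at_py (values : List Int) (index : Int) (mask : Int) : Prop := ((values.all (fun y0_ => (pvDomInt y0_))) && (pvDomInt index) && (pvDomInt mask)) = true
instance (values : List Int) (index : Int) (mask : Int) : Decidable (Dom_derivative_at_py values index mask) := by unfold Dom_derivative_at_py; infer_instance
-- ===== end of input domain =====

-- B replaces A's iterative submask-decrement loop by a divide-and-conquer recursion
-- on the lowest set bit of mask (alternative decomposition, same asymptotic cost).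
-- ===== PORT A =====
-- fuel-bounded transliteration of A's 'while True' loop; for mask ≥ 0 the submask
-- chain is strictly decreasing, so fuel mask.toNat + 1 is never exhausted.
-- Python raises IndexError on an out-of-range lookup; pyGetD's default 0 is only
-- reached outside Pre_derivative_at_py.
def derivative_at_py_loop (values : List Int) (index : Int) (mask : Int) : Nat → Int → Int → Int
  | 0, total, _ => total
  | fuel + 1, total, submask =>
    let total2 := PySem.Int.bxor total (PySem.List.pyGetD values (PySem.Int.bxor index submask) 0)
    if submask = 0 then total2
    else derivative_at_py_loop values index mask fuel total2 (PySem.Int.band (submask - 1) mask)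

def derivative_at_py (values : List Int) (index : Int) (mask : Int) : Int :=
  derivative_at_py_loop values index mask (mask.toNat + 1) 0 mask

-- ===== PORT B =====
-- fuel-bounded transliteration of B's recursion (rest = mask & (mask-1) loses a bit,
-- so for mask ≥ 0 fuel mask.toNat + 1 is never exhausted).
def derivative_at_py_alt_go (values : List Int) : Nat → Int → Int → Int
  | 0, _, _ => 0
  | fuel + 1, index, mask =>
    if mask = 0 then PySem.List.pyGetD values index 0
    else
      let rest := PySem.Int.band mask (mask - 1)
      let low := PySem.Int.bxor mask rest
      PySem.Int.bxor (derivative_at_py_alt_go values fuel index rest)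
                     (derivative_at_py_alt_go values fuel (PySem.Int.bxor index low) rest)

def derivative_at_py_alt (values : List Int) (index : Int) (mask : Int) : Int :=
  derivative_at_py_alt_go values (mask.toNat + 1) index mask

-- ===== PRECONDITION & SPEC =====
-- Pre_ = exactly where A returns without raising: mask ≥ 0 (a negative mask makes
-- the loop walk ever more negative submasks until an IndexError) and every lookup
-- index ^ s, s a submask of mask, is in range: their maximum is index | mask and,
-- for negative index (all lookups then negative, Python wraps), their minimum is
-- index & ~mask.
def Pre_derivative_at_py (values : List Int) (index : Int) (mask : Int) : Prop :=
  0 ≤ mask ∧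
    ((0 ≤ index ∧ PySem.Int.bor index mask < (values.length : Int)) ∨
      (index < 0 ∧ -(values.length : Int) ≤ PySem.Int.band index (Int.not mask)))
instance (values : List Int) (index : Int) (mask : Int) : Decidable (Pre_derivative_at_py values index mask) := by unfold Pre_derivative_at_py; infer_instance

def pvWitness_derivative_at_py : List Int × Int × Int := ([1, 2, 3, 4], 1, 2)

def Spec_derivative_at_py (values : List Int) (index : Int) (mask : Int) (out : Int) : Prop := out = derivative_at_py_alt values index mask
instance (values : List Int) (index : Int) (mask : Int) (out : Int) : Decidable (Spec_derivative_at_py values index mask out) := by unfold Spec_derivative_at_py; infer_instance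

-- ===== CLAIM (what is proved, stated in full; the proofs are below) =====
def Claim_equal_derivative_at_py : Prop := ∀ (values : List Int) (index : Int) (mask : Int), Dom_derivative_at_py values index mask → Pre_derivative_at_py values index mask → Spec_derivative_at_py values index mask (derivative_at_py values index mask)

-- ===== LEMMAS AND PROOFS =====

-- ---- Int xor: associativity via the (sign, magnitude) encoding ----
def pvDec (p : Bool × Nat) : Int := if p.1 then -(p.2 : Int) - 1 else (p.2 : Int)

def pvEnc (a : Int) : Bool × Nat := if 0 ≤ a then (false, a.toNat) else (true, (-a - 1).toNat)

lemma pv_bxor_enc (a b : Int) :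
    PySem.Int.bxor a b = pvDec (xor (pvEnc a).1 (pvEnc b).1, (pvEnc a).2 ^^^ (pvEnc b).2) := by
  unfold PySem.Int.bxor pvEnc pvDec
  by_cases h1 : 0 ≤ a <;> by_cases h2 : 0 ≤ b <;> simp [h1, h2]

lemma pv_enc_dec (p : Bool × Nat) : pvEnc (pvDec p) = p := by
  rcases p with ⟨s, n⟩
  cases s <;> simp [pvEnc, pvDec] <;> omega

lemma pv_bxor_assoc (a b c : Int) :
    PySem.Int.bxor (PySem.Int.bxor a b) c = PySem.Int.bxor a (PySem.Int.bxor b c) := by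
  rw [pv_bxor_enc a b, pv_bxor_enc b c, pv_bxor_enc (pvDec _) c, pv_bxor_enc a (pvDec _),
    pv_enc_dec, pv_enc_dec]
  simp [Bool.xor_assoc, Nat.xor_assoc]

lemma pv_zero_bxor (a : Int) : PySem.Int.bxor 0 a = a := by
  rw [PySem.Int.bxor_comm]; exact PySem.Int.bxor_zero a

-- ---- XOR-fold over a list of submasks ----
def pvX (g : Nat → Int) : List Nat → Int
  | [] => 0
  | s :: l => PySem.Int.bxor (g s) (pvX g l)

lemma pvX_append (g : Nat → Int) (l1 l2 : List Nat) :
    pvX g (l1 ++ l2) = PySem.Int.bxor (pvX g l1) (pvX g l2) := by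
  induction l1 with
  | nil => simp [pvX, pv_zero_bxor]
  | cons s l ih => simp [pvX, ih, pv_bxor_assoc]

lemma pvX_map (g : Nat → Int) (f : Nat → Nat) (l : List Nat) :
    pvX g (l.map f) = pvX (fun u => g (f u)) l := by
  induction l with
  | nil => rfl
  | cons s l ih => simp [pvX, ih]

lemma pvX_congr (g g' : Nat → Int) (l : List Nat) (h : ∀ u, g u = g' u) :
    pvX g l = pvX g' l := by
  induction l with
  | nil => rfl
  | cons s l ih => simp [pvX, ih, h]

lemma pvX_perm (g : Nat → Int) {l1 l2 : List Nat} (h : l1.Perm l2) : pvX g l1 = pvX g l2 := by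
  induction h with
  | nil => rfl
  | cons x _ ih => simp [pvX, ih]
  | swap x y l =>
      simp only [pvX]
      rw [← pv_bxor_assoc, ← pv_bxor_assoc, PySem.Int.bxor_comm (g y) (g x)]
  | trans _ _ ih1 ih2 => rw [ih1, ih2]

-- ---- Nat bit arithmetic: halving lemmas ----
lemma pv_and_mod2 (a b : Nat) : (a &&& b) % 2 = a % 2 * (b % 2) := by
  have h := Nat.testBit_land a b 0
  simp only [Nat.testBit_zero] at h
  rcases Nat.mod_two_eq_zero_or_one a with h1 | h1 <;>
    rcases Nat.mod_two_eq_zero_or_one b with h2 | h2 <;>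
      rcases Nat.mod_two_eq_zero_or_one (a &&& b) with h3 | h3 <;>
        simp [h1, h2, h3] at h ⊢ <;> omega

lemma pv_and_div2 (a b : Nat) : (a &&& b) / 2 = (a / 2) &&& (b / 2) := by
  apply Nat.eq_of_testBit_eq
  intro i
  simp [Nat.testBit_div_two, Nat.testBit_land]

lemma pv_and_rec (a b : Nat) :
    a &&& b = 2 * ((a / 2) &&& (b / 2)) + a % 2 * (b % 2) := by
  have h1 := pv_and_mod2 a b
  have h2 := pv_and_div2 a b
  omega

lemma pv_xor_mod2 (a b : Nat) : (a ^^^ b) % 2 = (a % 2 + b % 2) % 2 := by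
  have h := Nat.testBit_xor a b 0
  simp only [Nat.testBit_zero] at h
  rcases Nat.mod_two_eq_zero_or_one a with h1 | h1 <;>
    rcases Nat.mod_two_eq_zero_or_one b with h2 | h2 <;>
      rcases Nat.mod_two_eq_zero_or_one (a ^^^ b) with h3 | h3 <;>
        simp [h1, h2, h3] at h ⊢ <;> omega

lemma pv_xor_div2 (a b : Nat) : (a ^^^ b) / 2 = (a / 2) ^^^ (b / 2) := by
  apply Nat.eq_of_testBit_eq
  intro i
  simp [Nat.testBit_div_two, Nat.testBit_xor]

lemma pv_xor_rec (a b : Nat) :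
    a ^^^ b = 2 * ((a / 2) ^^^ (b / 2)) + (a % 2 + b % 2) % 2 := by
  have h1 := pv_xor_mod2 a b
  have h2 := pv_xor_div2 a b
  omega

-- ---- key lemma: (s-1) &&& M is the largest submask of M below s ----
lemma pv_key : ∀ (M s t : Nat), s &&& M = s → t &&& M = t → 0 < s →
    (t < s ↔ t ≤ (s - 1) &&& M) := by
  intro M
  induction M using Nat.strong_induction_on with
  | _ M IH =>
    intro s t hs ht h0
    rcases Nat.eq_zero_or_pos M with hM | hM
    · subst hM; simp [Nat.and_zero] at hs; omega
    have hMd : M / 2 < M := Nat.div_lt_self hM (by omega)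
    have hsr := pv_and_rec s M
    have htr := pv_and_rec t M
    have hs2 : (s / 2) &&& (M / 2) = s / 2 ∧ s % 2 * (M % 2) = s % 2 := by
      have h1 : (s / 2) &&& (M / 2) ≤ s / 2 := Nat.and_le_left
      have h2 : s % 2 * (M % 2) ≤ s % 2 := by
        rcases Nat.mod_two_eq_zero_or_one M with h | h <;> simp [h] <;> omega
      omega
    have ht2 : (t / 2) &&& (M / 2) = t / 2 ∧ t % 2 * (M % 2) = t % 2 := by
      have h1 : (t / 2) &&& (M / 2) ≤ t / 2 := Nat.and_le_left
      have h2 : t % 2 * (M % 2) ≤ t % 2 := by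
        rcases Nat.mod_two_eq_zero_or_one M with h | h <;> simp [h] <;> omega
      omega
    rcases Nat.mod_two_eq_zero_or_one s with hsb | hsb
    · -- s even, s = 2*(s/2), s/2 > 0
      have hs1 : 0 < s / 2 := by omega
      have hkey := IH (M / 2) hMd (s / 2) (t / 2) hs2.1 ht2.1 hs1
      have hrec := pv_and_rec (s - 1) M
      have hd : (s - 1) / 2 = s / 2 - 1 := by omega
      have hm : (s - 1) % 2 = 1 := by omega
      rw [hd, hm] at hrec
      have htb : t % 2 ≤ M % 2 := by
        rcases Nat.mod_two_eq_zero_or_one M with h | h <;> rw [h] at ht2 <;> omega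
      have hMb : M % 2 ≤ 1 := by omega
      have hu : (s / 2 - 1) &&& (M / 2) ≤ s / 2 - 1 := Nat.and_le_left
      constructor
      · intro h
        have h1 : t / 2 < s / 2 := by omega
        have h2 : t / 2 ≤ (s / 2 - 1) &&& (M / 2) := hkey.mp h1
        omega
      · intro h
        by_cases hc : t / 2 ≤ (s / 2 - 1) &&& (M / 2)
        · have := hkey.mpr hc; omega
        · omega
    · -- s odd: s - 1 = 2*(s/2), (s-1) &&& M = 2*(s/2)
      have hrec := pv_and_rec (s - 1) M
      have hd : (s - 1) / 2 = s / 2 := by omega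
      have hm : (s - 1) % 2 = 0 := by omega
      rw [hd, hm] at hrec
      rw [hs2.1] at hrec
      omega

-- ---- the chain of submasks A visits ----
def pvChain (M s : Nat) : List Nat :=
  if s = 0 then [0] else s :: pvChain M ((s - 1) &&& M)
  termination_by s
  decreasing_by
    have : (s - 1) &&& M ≤ s - 1 := Nat.and_le_left
    omega

lemma pv_sub_and (s M : Nat) : (s &&& M) &&& M = s &&& M := by
  rw [Nat.and_assoc, Nat.and_self]

lemma pvChain_mem (M : Nat) : ∀ s, s &&& M = s → ∀ t, (t ∈ pvChain M s ↔ (t &&& M = t ∧ t ≤ s)) := by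
  intro s
  induction s using Nat.strong_induction_on with
  | _ s IH =>
    intro hs t
    rw [pvChain]
    by_cases h0 : s = 0
    · rw [if_pos h0]
      subst h0
      simp only [List.mem_singleton]
      constructor
      · rintro rfl; exact ⟨Nat.zero_and M, le_refl 0⟩
      · rintro ⟨_, h⟩; omega
    · have hpos : 0 < s := by omega
      have hs' : ((s - 1) &&& M) &&& M = (s - 1) &&& M := pv_sub_and (s - 1) M
      have hlt : (s - 1) &&& M < s :=
        (pv_key M s ((s - 1) &&& M) hs hs' hpos).mpr (le_refl _)
      rw [if_neg h0]
      simp only [List.mem_cons]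
      rw [IH ((s - 1) &&& M) hlt hs' t]
      constructor
      · rintro (rfl | ⟨h1, h2⟩)
        · exact ⟨hs, le_refl _⟩
        · exact ⟨h1, by omega⟩
      · rintro ⟨h1, h2⟩
        by_cases he : t = s
        · exact Or.inl he
        · exact Or.inr ⟨h1, (pv_key M s t hs h1 hpos).mp (by omega)⟩

lemma pvChain_nodup (M : Nat) : ∀ s, s &&& M = s → (pvChain M s).Nodup := by
  intro s
  induction s using Nat.strong_induction_on with
  | _ s IH =>
    intro hs
    rw [pvChain]
    by_cases h0 : s = 0
    · simp [h0]
    · have hpos : 0 < s := by omega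
      have hs' : ((s - 1) &&& M) &&& M = (s - 1) &&& M := pv_sub_and (s - 1) M
      have hlt : (s - 1) &&& M < s :=
        (pv_key M s ((s - 1) &&& M) hs hs' hpos).mpr (le_refl _)
      rw [if_neg h0]
      refine List.nodup_cons.mpr ⟨?_, IH _ hlt hs'⟩
      intro hmem
      have := (pvChain_mem M ((s - 1) &&& M) hs' s).mp hmem
      omega

-- ---- the lowest set bit is a power of two ----
lemma pv_low_pow : ∀ M : Nat, 0 < M → ∃ k, M ^^^ (M &&& (M - 1)) = 2 ^ k := by
  intro M
  induction M using Nat.strong_induction_on with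
  | _ M IH =>
    intro hM
    rcases Nat.mod_two_eq_zero_or_one M with hMb | hMb
    · -- M even: lowest bit of M is twice that of M/2
      have hM2 : 0 < M / 2 := by omega
      obtain ⟨k, hk⟩ := IH (M / 2) (Nat.div_lt_self hM (by omega)) hM2
      have hand := pv_and_rec M (M - 1)
      have hd : (M - 1) / 2 = M / 2 - 1 := by omega
      have hm : (M - 1) % 2 = 1 := by omega
      rw [hd, hm, hMb] at hand
      have hxor := pv_xor_rec M (M &&& (M - 1))
      have ha2 : (M &&& (M - 1)) / 2 = (M / 2) &&& (M / 2 - 1) := by omega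
      have ha3 : (M &&& (M - 1)) % 2 = 0 := by omega
      rw [ha2, ha3, hMb] at hxor
      refine ⟨k + 1, ?_⟩
      rw [hxor, hk]
      ring
    · -- M odd: M &&& (M-1) = M - 1, xor = 1
      have hand := pv_and_rec M (M - 1)
      have hd : (M - 1) / 2 = M / 2 := by omega
      have hm : (M - 1) % 2 = 0 := by omega
      rw [hd, hm, Nat.and_self] at hand
      have hxor := pv_xor_rec M (M &&& (M - 1))
      have ha2 : (M &&& (M - 1)) / 2 = M / 2 := by omega
      have ha3 : (M &&& (M - 1)) % 2 = 0 := by omega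
      rw [ha2, ha3, Nat.xor_self, hMb] at hxor
      exact ⟨0, by omega⟩

-- ---- the submask list B's recursion generates ----
def pvSub (M : Nat) : List Nat :=
  if M = 0 then [0]
  else pvSub (M &&& (M - 1)) ++ (pvSub (M &&& (M - 1))).map (fun t => (M ^^^ (M &&& (M - 1))) ^^^ t)
  termination_by M
  decreasing_by
    all_goals
      have : M &&& (M - 1) ≤ M - 1 := Nat.and_le_right
      omega

lemma pvSub_mem : ∀ M t : Nat, t ∈ pvSub M ↔ t &&& M = t := by
  intro M
  induction M using Nat.strong_induction_on with
  | _ M IH =>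
    intro t
    rw [pvSub]
    by_cases h0 : M = 0
    · subst h0
      simp [Nat.and_zero, eq_comm]
    · have hM : 0 < M := by omega
      set R := M &&& (M - 1) with hR
      have hRlt : R < M := by
        have : R ≤ M - 1 := Nat.and_le_right
        omega
      have hRM : R &&& M = R := by
        rw [hR, Nat.and_comm M (M - 1), Nat.and_assoc, Nat.and_self]
      set L := M ^^^ R with hL
      have hLM : L &&& M = L := by
        rw [hL, Nat.and_xor_distrib_right, Nat.and_self, hRM]
      have hMR : M &&& R = R := by rw [Nat.and_comm]; exact hRM
      have hLR : L &&& R = 0 := by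
        rw [hL, Nat.and_xor_distrib_right, hMR, Nat.and_self, Nat.xor_self]
      have hLxR : L ^^^ R = M := by
        rw [hL, Nat.xor_assoc, Nat.xor_self, Nat.xor_zero]
      rw [if_neg h0]
      simp only [List.mem_append, List.mem_map]
      constructor
      · rintro (hmem | ⟨u, hu, rfl⟩)
        · have htR : t &&& R = t := (IH R hRlt t).mp hmem
          calc t &&& M = (t &&& R) &&& M := by rw [htR]
            _ = t &&& R := by rw [Nat.and_assoc, hRM]
            _ = t := htR
        · have huR : u &&& R = u := (IH R hRlt u).mp hu
          have huM : u &&& M = u := by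
            calc u &&& M = (u &&& R) &&& M := by rw [huR]
              _ = u &&& R := by rw [Nat.and_assoc, hRM]
              _ = u := huR
          rw [Nat.and_xor_distrib_right, hLM, huM]
      · intro htM
        obtain ⟨k, hk⟩ := pv_low_pow M hM
        rw [← hR, ← hL] at hk
        have htL : t &&& L = 0 ∨ t &&& L = L := by
          rw [hk, Nat.and_two_pow]
          cases t.testBit k <;> simp
        rcases htL with hc | hc
        · left
          rw [IH R hRlt t]
          have hdist : t &&& (L ^^^ R) = (t &&& L) ^^^ (t &&& R) := Nat.and_xor_distrib_left
          rw [hLxR, htM, hc, Nat.zero_xor] at hdist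
          exact hdist.symm
        · right
          refine ⟨t ^^^ L, ?_, ?_⟩
          · rw [IH R hRlt]
            have h1 : (t ^^^ L) &&& L = 0 := by
              rw [Nat.and_xor_distrib_right, hc, Nat.and_self, Nat.xor_self]
            have h2 : (t ^^^ L) &&& M = t ^^^ L := by
              rw [Nat.and_xor_distrib_right, htM, hLM]
            have hdist : (t ^^^ L) &&& (L ^^^ R) = ((t ^^^ L) &&& L) ^^^ ((t ^^^ L) &&& R) :=
              Nat.and_xor_distrib_left
            rw [hLxR, h2, h1, Nat.zero_xor] at hdist
            exact hdist.symm
          · rw [Nat.xor_comm t L, ← Nat.xor_assoc, Nat.xor_self, Nat.zero_xor]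

lemma pvSub_nodup : ∀ M : Nat, (pvSub M).Nodup := by
  intro M
  induction M using Nat.strong_induction_on with
  | _ M IH =>
    rw [pvSub]
    by_cases h0 : M = 0
    · simp [h0]
    · have hM : 0 < M := by omega
      set R := M &&& (M - 1) with hR
      have hRlt : R < M := by
        have : R ≤ M - 1 := Nat.and_le_right
        omega
      have hRM : R &&& M = R := by
        rw [hR, Nat.and_comm M (M - 1), Nat.and_assoc, Nat.and_self]
      set L := M ^^^ R with hL
      have hMR : M &&& R = R := by rw [Nat.and_comm]; exact hRM
      have hLR : L &&& R = 0 := by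
        rw [hL, Nat.and_xor_distrib_right, hMR, Nat.and_self, Nat.xor_self]
      obtain ⟨k, hk⟩ := pv_low_pow M hM
      rw [← hR, ← hL] at hk
      have hLpos : 0 < L := by rw [hk]; positivity
      rw [if_neg h0]
      rw [List.nodup_append]
      refine ⟨IH R hRlt, ?_, ?_⟩
      · refine List.Nodup.map ?_ (IH R hRlt)
        intro u v huv
        have huv' : L ^^^ u = L ^^^ v := huv
        calc u = (L ^^^ L) ^^^ u := by rw [Nat.xor_self, Nat.zero_xor]
          _ = L ^^^ (L ^^^ u) := Nat.xor_assoc L L u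
          _ = L ^^^ (L ^^^ v) := congrArg (L ^^^ ·) huv'
          _ = (L ^^^ L) ^^^ v := (Nat.xor_assoc L L v).symm
          _ = v := by rw [Nat.xor_self, Nat.zero_xor]
      · intro a ha b hb
        have haR : a &&& R = a := (pvSub_mem R a).mp ha
        have haL : a &&& L = 0 := by
          calc a &&& L = (a &&& R) &&& L := by rw [haR]
            _ = a &&& (R &&& L) := Nat.and_assoc a R L
            _ = 0 := by rw [Nat.and_comm R L, hLR, Nat.and_zero]
        simp only [List.mem_map] at hb
        obtain ⟨u, hu, rfl⟩ := hb
        have huR : u &&& R = u := (pvSub_mem R u).mp hu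
        have huL : u &&& L = 0 := by
          calc u &&& L = (u &&& R) &&& L := by rw [huR]
            _ = u &&& (R &&& L) := Nat.and_assoc u R L
            _ = 0 := by rw [Nat.and_comm R L, hLR, Nat.and_zero]
        intro hab
        have hEq : a &&& L = (L ^^^ u) &&& L := by rw [← hab]
        rw [haL, Nat.and_xor_distrib_right, Nat.and_self, huL, Nat.xor_zero] at hEq
        omega

-- ---- the chain and the recursion list are permutations of each other ----
lemma pv_perm (M : Nat) : (pvChain M M).Perm (pvSub M) := by
  rw [List.perm_ext_iff_of_nodup (pvChain_nodup M M (Nat.and_self M)) (pvSub_nodup M)]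
  intro t
  rw [pvChain_mem M M (Nat.and_self M) t, pvSub_mem M t]
  constructor
  · rintro ⟨h, _⟩; exact h
  · intro h
    refine ⟨h, ?_⟩
    calc t = t &&& M := h.symm
      _ ≤ M := Nat.and_le_right

-- ---- A's loop computes the XOR-fold over the chain ----
lemma pv_loopA (values : List Int) (i : Int) (M : Nat) :
    ∀ (fuel : Nat) (s : Nat) (total : Int), s &&& M = s → s < fuel →
      derivative_at_py_loop values i (M : Int) fuel total ((s : Nat) : Int)
        = PySem.Int.bxor total
            (pvX (fun u => PySem.List.pyGetD values (PySem.Int.bxor i (u : Int)) 0) (pvChain M s)) := by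
  intro fuel
  induction fuel with
  | zero => intro s total _ h; omega
  | succ fuel ih =>
    intro s total hs hlt
    rw [derivative_at_py_loop]
    by_cases h0 : s = 0
    · subst h0
      simp only [Nat.cast_zero, if_pos rfl]
      rw [pvChain]
      simp [pvX, PySem.Int.bxor_zero]
    · have hne : ((s : Nat) : Int) ≠ 0 := by
        simp only [ne_eq, Nat.cast_eq_zero]; exact h0
      rw [if_neg hne]
      have hcast : ((s : Nat) : Int) - 1 = (((s - 1 : Nat) : Nat) : Int) := by omega
      rw [hcast, PySem.Int.band_natCast]
      have hs' : ((s - 1) &&& M) &&& M = (s - 1) &&& M := pv_sub_and (s - 1) M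
      have hlt' : (s - 1) &&& M < fuel := by
        have : (s - 1) &&& M ≤ s - 1 := Nat.and_le_left
        omega
      rw [pvChain, if_neg h0]
      rw [ih ((s - 1) &&& M) _ hs' hlt']
      simp only [pvX]
      rw [pv_bxor_assoc]

-- ---- B's recursion computes the XOR-fold over pvSub ----
lemma pv_goB (values : List Int) :
    ∀ (fuel : Nat) (M : Nat) (i : Int), M < fuel →
      derivative_at_py_alt_go values fuel i ((M : Nat) : Int)
        = pvX (fun u => PySem.List.pyGetD values (PySem.Int.bxor i (u : Int)) 0) (pvSub M) := by
  intro fuel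
  induction fuel with
  | zero => intro M i h; omega
  | succ fuel ih =>
    intro M i hlt
    rw [derivative_at_py_alt_go]
    by_cases h0 : M = 0
    · subst h0
      simp only [Nat.cast_zero, if_pos rfl]
      rw [pvSub]
      simp [pvX, PySem.Int.bxor_zero]
    · have hne : ((M : Nat) : Int) ≠ 0 := by
        simp only [ne_eq, Nat.cast_eq_zero]; exact h0
      rw [if_neg hne]
      have hcast : ((M : Nat) : Int) - 1 = (((M - 1 : Nat) : Nat) : Int) := by omega
      rw [hcast]
      simp only [PySem.Int.band_natCast, PySem.Int.bxor_natCast]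
      set R := M &&& (M - 1) with hR
      set L := M ^^^ R with hL
      have hRlt : R < fuel := by
        have : R ≤ M - 1 := Nat.and_le_right
        omega
      rw [pvSub, if_neg h0, ← hR, ← hL]
      rw [ih R i hRlt, ih R (PySem.Int.bxor i (L : Int)) hRlt]
      rw [pvX_append, pvX_map]
      congr 1
      apply pvX_congr
      intro u
      simp only [hL, ← PySem.Int.bxor_natCast, pv_bxor_assoc]

-- ===== VERDICT (by name: the statement is the Claim_ definition above) =====
theorem derivative_at_py_spec : Claim_equal_derivative_at_py := by
  intro values index mask _ hpre
  obtain ⟨hm, _⟩ := hpre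
  unfold Spec_derivative_at_py derivative_at_py derivative_at_py_alt
  set M := mask.toNat with hM
  have hmask : mask = ((M : Nat) : Int) := by omega
  rw [hmask]
  have h1 := pv_loopA values index M (M + 1) M 0 (Nat.and_self M) (by omega)
  have h2 := pv_goB values (M + 1) M index (by omega)
  rw [h1, h2, pv_zero_bxor]
  exact pvX_perm _ (pv_perm M)
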